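-- pv_equiv track=rewrite | github.com/customaddone/beginPython | cgi-bin/library/math/matrix.py | array_cnt
-- ===== SOURCE A (Python) =====
-- def array_cnt(ar1, ar2, m):
--     h = len(ar1)
--     w = len(ar2[0])
--     row = ar1
--     col = []
--     for j in range(w):
--         opt = []
--         for i in range(len(ar2)):
--             opt.append(ar2[i][j])
--         col.append(opt)
--
--     res = [[[0, 0] for i in range(w)] for i in range(h)]
--     for i in range(h):
--         for j in range(w):
--             cnt = 0
--             for x, y in zip(row[i], col[j]):
--                 cnt += x * y
--             res[i][j] = cnt
--             res[i][j] %= m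
--     return res
-- ===== SOURCE B (Python) =====
-- def array_cnt(ar1, ar2, m):
--     # Row-oriented algorithm: each output row is a linear combination of ar2's rows
--     # (accumulated by vector updates), instead of per-cell dot products over columns.
--     w = len(ar2[0])
--     res = []
--     for coeffs in ar1:
--         acc = [0] * w
--         for x, r in zip(coeffs, ar2):
--             acc = [a + x * b for a, b in zip(acc, r)]
--         res.append([a % m for a in acc])
--     return res
-- ===== Notes on version B (the rewrite author's own statement) =====
-- stated objective: alternative
-- what changed: B computes each output row as a linear combination of ar2's rows via repeated vector (AXPY) updates on a running accumulator row, instead of A's transpose-then-per-cell dot products; no column is ever formed or scanned.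
import Mathlib
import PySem

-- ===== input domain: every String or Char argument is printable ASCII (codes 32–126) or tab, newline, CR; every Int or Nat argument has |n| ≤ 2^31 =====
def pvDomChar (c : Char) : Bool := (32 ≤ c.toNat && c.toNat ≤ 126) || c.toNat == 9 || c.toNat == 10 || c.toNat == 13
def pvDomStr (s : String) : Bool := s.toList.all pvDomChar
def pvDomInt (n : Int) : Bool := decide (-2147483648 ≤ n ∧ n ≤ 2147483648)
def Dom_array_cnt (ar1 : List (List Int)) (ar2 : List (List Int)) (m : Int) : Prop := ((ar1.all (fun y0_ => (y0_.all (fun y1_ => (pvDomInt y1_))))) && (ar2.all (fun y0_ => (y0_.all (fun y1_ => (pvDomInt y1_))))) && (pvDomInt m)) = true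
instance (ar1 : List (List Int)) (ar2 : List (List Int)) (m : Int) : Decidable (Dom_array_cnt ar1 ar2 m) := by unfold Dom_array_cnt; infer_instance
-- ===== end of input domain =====

-- B replaces A's transpose + per-cell dot products with a row-oriented algorithm:
-- each output row is a linear combination of ar2's rows built by vector updates
-- (objective: alternative; same asymptotic cost).

-- ===== PORT A =====
-- The `res = [[[0,0] …]]` initial table of A is dead state (every cell is overwritten
-- before being read and before return), so the port builds each cell directly.
def array_cnt (ar1 : List (List Int)) (ar2 : List (List Int)) (m : Int) : List (List Int) :=
  let h : Int := ar1.length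
  let w : Int := ((PySem.List.pyGet? ar2 0).getD []).length
  let row := ar1
  let col : List (List Int) :=
    (PySem.List.pyRange 0 w 1).foldl (fun col j =>
      col ++ [(PySem.List.pyRange 0 (ar2.length : Int) 1).foldl (fun opt i =>
        opt ++ [PySem.List.pyGetD (PySem.List.pyGetD ar2 i []) j 0]) []]) []
  (PySem.List.pyRange 0 h 1).map (fun i =>
    (PySem.List.pyRange 0 w 1).map (fun j =>
      let cnt := ((PySem.List.pyGetD row i []).zip (PySem.List.pyGetD col j [])).foldl
        (fun cnt xy => cnt + xy.1 * xy.2) 0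
      PySem.Int.mod cnt m))

-- ===== PORT B =====
def array_cnt_alt (ar1 : List (List Int)) (ar2 : List (List Int)) (m : Int) : List (List Int) :=
  let w : Nat := ((PySem.List.pyGet? ar2 0).getD []).length
  ar1.foldl (fun res coeffs =>
    res ++ [((coeffs.zip ar2).foldl
        (fun acc xr => (acc.zip xr.2).map (fun ab => ab.1 + xr.1 * ab.2))
        (List.replicate w 0)).map (fun a => PySem.Int.mod a m)]) []

-- ===== PRECONDITION & SPEC =====
-- Pre_ excludes exactly the inputs where the Python A raises: ar2 = [] (IndexError on
-- ar2[0]), a row of ar2 shorter than ar2[0] (IndexError while building the transpose),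
-- and m = 0 when some `%= m` actually runs, i.e. when ar1 and ar2[0] are both nonempty
-- (ZeroDivisionError).
def Pre_array_cnt (ar1 : List (List Int)) (ar2 : List (List Int)) (m : Int) : Prop :=
  ar2 ≠ [] ∧ (∀ r ∈ ar2, (ar2.headI).length ≤ r.length) ∧
    (m ≠ 0 ∨ ar1 = [] ∨ ar2.headI = [])
instance (ar1 : List (List Int)) (ar2 : List (List Int)) (m : Int) : Decidable (Pre_array_cnt ar1 ar2 m) := by unfold Pre_array_cnt; infer_instance
def pvWitness_array_cnt : List (List Int) × List (List Int) × Int := ([[1, 2], [3, 4]], [[1, 0], [0, 1]], 5)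

def Spec_array_cnt (ar1 : List (List Int)) (ar2 : List (List Int)) (m : Int) (out : List (List Int)) : Prop := out = array_cnt_alt ar1 ar2 m
instance (ar1 : List (List Int)) (ar2 : List (List Int)) (m : Int) (out : List (List Int)) : Decidable (Spec_array_cnt ar1 ar2 m out) := by unfold Spec_array_cnt; infer_instance

-- ===== CLAIM (what is proved, stated in full; the proofs are below) =====
def Claim_equal_array_cnt : Prop := ∀ (ar1 : List (List Int)) (ar2 : List (List Int)) (m : Int), Dom_array_cnt ar1 ar2 m → Pre_array_cnt ar1 ar2 m → Spec_array_cnt ar1 ar2 m (array_cnt ar1 ar2 m)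

-- ===== LEMMAS AND PROOFS =====

-- 'for i in range(len(xs)): … F(xs[i]) …' collected by map is xs.map F
lemma map_pyGetD_comp {α β : Type} (xs : List α) (d : α) (F : α → β) :
    (PySem.List.pyRange 0 (xs.length : Int) 1).map (fun i => F (PySem.List.pyGetD xs i d))
      = xs.map F := by
  rw [show (fun i => F (PySem.List.pyGetD xs i d))
        = F ∘ (fun i => PySem.List.pyGetD xs i d) from rfl,
      ← List.map_map, PySem.List.map_pyGetD_pyRange_zero']

-- zipping with the j-th column read off ar2 directly instead of from the transpose
lemma zip_col_foldl (r : List Int) (ar2 : List (List Int)) (j : Int) :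
    ((r.zip (ar2.map (fun rr => PySem.List.pyGetD rr j 0))).foldl
        (fun c xy => c + xy.1 * xy.2) 0)
      = (r.zip ar2).foldl (fun c xr => c + xr.1 * PySem.List.pyGetD xr.2 j 0) 0 := by
  rw [List.zip_map_right, List.foldl_map]
  simp

-- B's inner loop: one AXPY step on an accumulator of width w
lemma axpy_step (w : Nat) (base : Nat → Int) (x : Int) (r : List Int) (hr : w ≤ r.length) :
    (((List.range w).map base).zip r).map (fun ab => ab.1 + x * ab.2)
      = (List.range w).map (fun j => base j + x * r.getD j 0) := by
  apply List.ext_getElem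
  · simp [Nat.min_eq_left hr]
  · intro i h1 h2
    have hiw : i < w := by simpa [Nat.min_eq_left hr] using h1
    have hir : i < r.length := lt_of_lt_of_le hiw hr
    simp [List.getElem_zip, List.getElem?_eq_getElem hir]

-- B's accumulator after the whole fold, index-wise
lemma fold_axpy (w : Nat) (ps : List (Int × List Int)) (hp : ∀ p ∈ ps, w ≤ p.2.length)
    (base : Nat → Int) :
    ps.foldl (fun acc xr => (acc.zip xr.2).map (fun ab => ab.1 + xr.1 * ab.2))
        ((List.range w).map base)
      = (List.range w).map
          (fun j => base j + (ps.map (fun p => p.1 * p.2.getD j 0)).sum) := by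
  induction ps generalizing base with
  | nil => simp
  | cons p ps ih =>
    have hr : w ≤ p.2.length := hp p (List.mem_cons_self)
    rw [List.foldl_cons, axpy_step w base p.1 p.2 hr,
      ih (fun q hq => hp q (List.mem_cons_of_mem p hq))]
    refine List.map_congr_left (fun j _ => ?_)
    simp [List.sum_cons]; ring

lemma ports_eq (ar1 ar2 : List (List Int)) (m : Int)
    (hrows : ∀ r ∈ ar2, (ar2.headI).length ≤ r.length) :
    array_cnt ar1 ar2 m = array_cnt_alt ar1 ar2 m := by
  unfold array_cnt array_cnt_alt
  simp only [PySem.List.foldl_append_singleton_eq_map, List.nil_append]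
  set wn : Nat := ((PySem.List.pyGet? ar2 0).getD []).length with hw
  have hw2 : ∀ p ∈ ar2, wn ≤ p.length := by
    intro p hp
    have he : (ar2.headI).length = wn := by
      cases ar2 with
      | nil => cases hp
      | cons a l => simp [hw, PySem.List.pyGet?, PySem.List.pyIdx?]
    exact he ▸ hrows p hp
  conv_rhs => rw [← PySem.List.map_pyGetD_pyRange_zero' ar1 ([] : List Int), List.map_map]
  refine List.map_congr_left (fun i _ => ?_)
  simp only [Function.comp]
  trans (PySem.List.pyRange 0 (wn : Int) 1).map (fun j =>
    PySem.Int.mod (0 + (((PySem.List.pyGetD ar1 i []).zip ar2).map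
      (fun xr => xr.1 * PySem.List.pyGetD xr.2 j 0)).sum) m)
  · refine List.map_congr_left (fun j hj => ?_)
    obtain ⟨hj0, hjw⟩ := (PySem.List.mem_pyRange_one).1 hj
    rw [PySem.List.pyGetD_map_pyRange_of_nonneg _ _ _ _ hj0 hjw,
      map_pyGetD_comp ar2 ([] : List Int) (fun rr => PySem.List.pyGetD rr j 0),
      zip_col_foldl, PySem.List.foldl_add]
  · rw [show List.replicate wn (0 : Int) = (List.range wn).map (fun _ => 0) by simp,
      fold_axpy wn _ (fun p hp => hw2 p.2 (List.of_mem_zip hp).2) (fun _ => 0),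
      PySem.List.pyRange_zero_natCast, List.map_map, List.map_map]
    refine List.map_congr_left (fun j hj => ?_)
    simp [PySem.List.pyGetD_natCast]

-- ===== VERDICT (by name: the statement is the Claim_ definition above) =====
theorem array_cnt_spec : Claim_equal_array_cnt := by
  intro ar1 ar2 m _ hpre
  unfold Spec_array_cnt
  exact ports_eq ar1 ar2 m hpre.2.1
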